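-- pv_equiv track=rewrite | github.com/Zhengxian-Fan/rp | ModelPkg/utils.py | index_seg_viaAge
-- ===== SOURCE A (Python) =====
-- def index_seg_viaAge(age):
--     seg = []
--     flag = 0
--     age0= age[0]
--     for i ,token in enumerate(age):
--         if token != age0:
--             seg.append(flag)
--             flag =1-flag
--             age0=token
--         else:
--             seg.append(flag)
--     return seg
-- ===== SOURCE B (Python) =====
-- def index_seg_viaAge(age):
--     if not age:
--         return []
--     diffs = [0] + [1 if a != b else 0 for a, b in zip(age[1:], age)]
--     out = []
--     acc = 0
--     for d in diffs:
--         out.append(acc % 2)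
--         acc += d
--     return out
-- ===== Notes on version B (the rewrite author's own statement) =====
-- stated objective: alternative
-- what changed: Replaces A's stateful toggle loop (mutable flag flipped at each value change) with a two-phase prefix-parity computation: first a table marking adjacent value changes, then a running sum whose parity (taken before adding the current entry) gives each flag.
import Mathlib
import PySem

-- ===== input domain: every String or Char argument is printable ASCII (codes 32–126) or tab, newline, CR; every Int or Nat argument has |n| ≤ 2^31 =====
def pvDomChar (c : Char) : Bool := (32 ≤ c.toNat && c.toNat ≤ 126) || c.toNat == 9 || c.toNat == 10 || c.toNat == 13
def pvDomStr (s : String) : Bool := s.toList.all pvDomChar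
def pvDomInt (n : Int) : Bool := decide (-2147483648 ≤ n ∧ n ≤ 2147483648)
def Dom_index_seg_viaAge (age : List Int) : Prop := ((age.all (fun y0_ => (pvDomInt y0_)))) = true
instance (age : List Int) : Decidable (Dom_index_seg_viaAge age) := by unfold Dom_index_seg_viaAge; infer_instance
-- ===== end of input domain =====

-- B replaces A's stateful flag-toggle loop by a diff table plus a prefix-parity scan (alternative decomposition, same cost).

-- ===== PORT A =====
-- literal port of A: the first-element access via pyGet? (none = IndexError, excluded by Pre_);
-- the for-loop over enumerate(age) folds state (seg, flag, age0); index i is unused by A.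
def index_seg_viaAge (age : List Int) : List Int :=
  match PySem.List.pyGet? age 0 with
  | none => []   -- IndexError in Python; outside Pre_
  | some a0 =>
    ((PySem.List.enumerate age).foldl
      (fun (s : List Int × Int × Int) it =>
        let token := it.2
        if token ≠ s.2.2 then (s.1 ++ [s.2.1], 1 - s.2.1, token)
        else (s.1 ++ [s.2.1], s.2.1, s.2.2))
      ([], 0, a0)).1

-- ===== PORT B =====
-- literal port of Source B; age[1:] is List.drop 1 (exact for this slice), acc % 2 is PySem.Int.mod.
def index_seg_viaAge_alt (age : List Int) : List Int :=
  if age = [] then []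
  else
    let diffs : List Int :=
      (0 : Int) :: ((age.drop 1).zip age).map (fun p => if p.1 ≠ p.2 then (1 : Int) else 0)
    (diffs.foldl (fun (s : List Int × Int) d => (s.1 ++ [PySem.Int.mod s.2 2], s.2 + d)) ([], 0)).1

-- ===== PRECONDITION & SPEC =====
-- Pre_ excludes only the empty list, on which A raises IndexError reading the first element.
def Pre_index_seg_viaAge (age : List Int) : Prop := age ≠ []
instance (age : List Int) : Decidable (Pre_index_seg_viaAge age) := by unfold Pre_index_seg_viaAge; infer_instance
def pvWitness_index_seg_viaAge : List Int := ([3, 3, 5, 5, 7])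

def Spec_index_seg_viaAge (age : List Int) (out : List Int) : Prop := out = index_seg_viaAge_alt age
instance (age : List Int) (out : List Int) : Decidable (Spec_index_seg_viaAge age out) := by unfold Spec_index_seg_viaAge; infer_instance

-- ===== CLAIM (what is proved, stated in full; the proofs are below) =====
def Claim_equal_index_seg_viaAge : Prop := ∀ (age : List Int), Dom_index_seg_viaAge age → Pre_index_seg_viaAge age → Spec_index_seg_viaAge age (index_seg_viaAge age)

-- ===== LEMMAS AND PROOFS =====

-- recursive characterisation of A's loop body (emitted flags)
def goA : List Int → Int → Int → List Int
  | [], _, _ => []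
  | t :: ts, f, a0 => if t ≠ a0 then f :: goA ts (1 - f) t else f :: goA ts f a0

-- recursive characterisation of B's loop body
def goB : List Int → Int → List Int
  | [], _ => []
  | d :: ds, acc => PySem.Int.mod acc 2 :: goB ds (acc + d)

-- the diff table of B, recursively
def dAux : Int → List Int → List Int
  | _, [] => []
  | a0, t :: ts => (if t ≠ a0 then (1 : Int) else 0) :: dAux t ts

theorem foldA_eq_goA (ps : List (Int × Int)) (seg : List Int) (f a0 : Int) :
    (ps.foldl
      (fun (s : List Int × Int × Int) it =>
        let token := it.2
        if token ≠ s.2.2 then (s.1 ++ [s.2.1], 1 - s.2.1, token)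
        else (s.1 ++ [s.2.1], s.2.1, s.2.2))
      (seg, f, a0)).1 = seg ++ goA (ps.map Prod.snd) f a0 := by
  induction ps generalizing seg f a0 with
  | nil => simp [goA]
  | cons p ps ih =>
    rw [List.foldl_cons]
    by_cases h : p.2 ≠ a0
    · have hs : (fun (s : List Int × Int × Int) (it : Int × Int) =>
          let token := it.2
          if token ≠ s.2.2 then (s.1 ++ [s.2.1], 1 - s.2.1, token)
          else (s.1 ++ [s.2.1], s.2.1, s.2.2)) (seg, f, a0) p = (seg ++ [f], 1 - f, p.2) := by
        simp [h]
      simp only [hs]; rw [ih, List.map_cons, goA, if_pos h, List.append_assoc, List.singleton_append]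
    · have hs : (fun (s : List Int × Int × Int) (it : Int × Int) =>
          let token := it.2
          if token ≠ s.2.2 then (s.1 ++ [s.2.1], 1 - s.2.1, token)
          else (s.1 ++ [s.2.1], s.2.1, s.2.2)) (seg, f, a0) p = (seg ++ [f], f, a0) := by
        simp [h]
      simp only [hs]; rw [ih, List.map_cons, goA, if_neg h, List.append_assoc, List.singleton_append]

theorem foldB_eq_goB (ds : List Int) (out : List Int) (acc : Int) :
    (ds.foldl (fun (s : List Int × Int) d => (s.1 ++ [PySem.Int.mod s.2 2], s.2 + d)) (out, acc)).1
      = out ++ goB ds acc := by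
  induction ds generalizing out acc with
  | nil => simp [goB]
  | cons d ds ih =>
    rw [List.foldl_cons]
    have hs : (fun (s : List Int × Int) (d : Int) => (s.1 ++ [PySem.Int.mod s.2 2], s.2 + d))
        (out, acc) d = (out ++ [PySem.Int.mod acc 2], acc + d) := rfl
    simp only [hs]; rw [ih, goB, List.append_assoc, List.singleton_append]

theorem zipmap_eq_dAux (rest : List Int) (a0 : Int) :
    (rest.zip (a0 :: rest)).map (fun p => if p.1 ≠ p.2 then (1 : Int) else 0) = dAux a0 rest := by
  induction rest generalizing a0 with
  | nil => simp [dAux]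
  | cons t ts ih =>
    rw [List.zip_cons_cons, List.map_cons, dAux, ih]

theorem mod_two_py (a : Int) : PySem.Int.mod a 2 = a % 2 :=
  PySem.Int.mod_eq_emod_of_pos (by norm_num)

theorem goA_eq_goB (rest : List Int) (a0 f acc : Int) (h : f = PySem.Int.mod acc 2) :
    goA rest f a0 = goB (dAux a0 rest) acc := by
  induction rest generalizing a0 f acc with
  | nil => simp [goA, dAux, goB]
  | cons t ts ih =>
    subst h
    by_cases hc : t ≠ a0
    · rw [goA, dAux, goB, if_pos hc, if_pos hc]
      exact congrArg (List.cons (PySem.Int.mod acc 2))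
        (ih t _ (acc + 1) (by simp only [mod_two_py]; omega))
    · rw [goA, dAux, goB, if_neg hc, if_neg hc]
      push_neg at hc
      subst hc
      exact congrArg (List.cons (PySem.Int.mod acc 2))
        (ih t _ (acc + 0) (by rw [add_zero]))

-- ===== VERDICT (by name: the statement is the Claim_ definition above) =====
theorem index_seg_viaAge_spec : Claim_equal_index_seg_viaAge := by
  intro age _ hpre
  unfold Spec_index_seg_viaAge
  obtain ⟨a0, rest, rfl⟩ : ∃ a0 rest, age = a0 :: rest := by
    cases age with
    | nil => exact absurd rfl hpre
    | cons x xs => exact ⟨x, xs, rfl⟩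
  unfold index_seg_viaAge index_seg_viaAge_alt
  simp only [PySem.List.pyGet?_zero_cons, List.drop_succ_cons, List.drop_zero,
    reduceCtorEq, if_false, ite_false]
  rw [foldA_eq_goA, foldB_eq_goB, PySem.List.map_snd_enumerate, zipmap_eq_dAux]
  simp only [List.nil_append, goA, goB]
  have h0 : PySem.Int.mod 0 2 = (0 : Int) := by rw [mod_two_py]; decide
  simp only [ne_eq, not_true_eq_false, if_false, ite_false, h0]
  rw [goA_eq_goB rest a0 0 0 (by rw [h0])]
  simp
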